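-- pv_equiv track=rewrite | github.com/Saptarshi666/Go_agent | my_player3.py | find_died_pieces
-- ===== SOURCE A (Python) =====
-- def find_died_pieces(Matrix_for_opponent, piece_type):
--         '''
--         Find the died stones that has no liberty in the board for a given piece type.
--
--         :param piece_type: 1('X') or 2('O').
--         :return: a list containing the dead pieces row and column(row, column).
--         '''
--         board = Matrix_for_opponent
--         died_pieces = []
--
--         for i in range(len(board)):
--             for j in range(len(board)):
--                 # Check if there is a piece at this position:
--                 if board[i][j] == piece_type:
--                     # The piece die if it has no liberty
--                     if not find_liberty(i, j,board):
--                         died_pieces.append((i,j))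
--         return died_pieces
--
-- def detect_neighbor( i, j,Matrix_for_opponent):
--         '''
--         Detect all the neighbors of a given stone.
--
--         :param i: row number of the board.
--         :param j: column number of the board.
--         :return: a list containing the neighbors row and column (row, column) of position (i, j).
--         '''
--         board = Matrix_for_opponent
--         neighbors = []
--         # Detect borders and add neighbor coordinates
--         if i > 0: neighbors.append((i-1, j))
--         if i < len(board) - 1: neighbors.append((i+1, j))
--         if j > 0: neighbors.append((i, j-1))
--         if j < len(board) - 1: neighbors.append((i, j+1))
--         return neighbors
--
-- def detect_neighbor_ally( i, j, Matrix_for_opponent):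
--         '''
--         Detect the neighbor allies of a given stone.
--
--         :param i: row number of the board.
--         :param j: column number of the board.
--         :return: a list containing the neighbored allies row and column (row, column) of position (i, j).
--         '''
--         board = Matrix_for_opponent
--         neighbors = detect_neighbor(i, j, Matrix_for_opponent)  # Detect neighbors
--         group_allies = []
--         # Iterate through neighbors
--         for piece in neighbors:
--             # Add to allies list if having the same color
--             if board[piece[0]][piece[1]] == board[i][j]:
--                 group_allies.append(piece)
--         return group_allies
--
-- def ally_dfs(i,j,Matrix_for_opponent):
--     stack = [(i, j)]  # stack for DFS serach
--     ally_members = []  # record allies positions during the search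
--     while stack:
--         piece = stack.pop()
--         ally_members.append(piece)
--         neighbor_allies = detect_neighbor_ally(piece[0], piece[1],Matrix_for_opponent)
--         for ally in neighbor_allies:
--             if ally not in stack and ally not in ally_members:
--                 stack.append(ally)
--     return ally_members
--
-- def find_liberty(i,j,Matrix_for_opponent):
--      board = Matrix_for_opponent
--      ally_members = ally_dfs(i, j,Matrix_for_opponent)
--      for member in ally_members:
--         neighbors = detect_neighbor(member[0], member[1], Matrix_for_opponent)
--         for piece in neighbors:
--                 # If there is empty space around a piece, it has liberty
--             if board[piece[0]][piece[1]] == 0: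
--                 return True
--         # If none of the pieces in a allied group has an empty space, it has no liberty
--      return False
-- ===== SOURCE B (Python) =====
-- def find_died_pieces(Matrix_for_opponent, piece_type):
--     '''Single multi-source flood fill: seed every stone of piece_type that touches an
--     empty cell, spread liberty through same-colored neighbors once, then collect the
--     unreached stones in row-major order (one flood for the whole board instead of a
--     separate DFS per stone).'''
--     board = Matrix_for_opponent
--     n = len(board)
--     alive = set()
--     frontier = []
--     for i in range(n):
--         for j in range(n):
--             if board[i][j] == piece_type and any(
--                 board[a][b] == 0
--                 for a, b in ((i - 1, j), (i + 1, j), (i, j - 1), (i, j + 1))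
--                 if 0 <= a < n and 0 <= b < n
--             ):
--                 alive.add((i, j))
--                 frontier.append((i, j))
--     while frontier:
--         i, j = frontier.pop()
--         for a, b in ((i - 1, j), (i + 1, j), (i, j - 1), (i, j + 1)):
--             if 0 <= a < n and 0 <= b < n and board[a][b] == piece_type and (a, b) not in alive:
--                 alive.add((a, b))
--                 frontier.append((a, b))
--     return [(i, j) for i in range(n) for j in range(n)
--             if board[i][j] == piece_type and (i, j) not in alive]
-- ===== Notes on version B (the rewrite author's own statement) =====
-- stated objective: alternative
-- what changed: Replaced the per-stone DFS (re-run for every stone, with linear membership checks on stack/members) by one multi-source flood fill: seed all stones of the color touching an empty cell, spread liberty once through same-colored neighbors via a hash set, and collect the unmarked stones in row-major order.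
import Mathlib
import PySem

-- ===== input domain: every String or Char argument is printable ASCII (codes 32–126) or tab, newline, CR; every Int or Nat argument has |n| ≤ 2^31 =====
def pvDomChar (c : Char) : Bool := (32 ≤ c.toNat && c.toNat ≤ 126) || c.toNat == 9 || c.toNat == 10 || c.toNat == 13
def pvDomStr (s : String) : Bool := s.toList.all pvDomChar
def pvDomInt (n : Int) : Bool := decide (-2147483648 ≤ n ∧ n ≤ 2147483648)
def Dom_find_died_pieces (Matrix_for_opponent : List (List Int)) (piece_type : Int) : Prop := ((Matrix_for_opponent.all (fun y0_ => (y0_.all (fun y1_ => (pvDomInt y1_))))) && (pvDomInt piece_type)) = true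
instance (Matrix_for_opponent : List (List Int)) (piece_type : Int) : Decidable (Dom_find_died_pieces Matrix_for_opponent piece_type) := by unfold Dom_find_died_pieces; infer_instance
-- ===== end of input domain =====

-- B replaces A's per-stone DFS (quadratically many searches, each with linear membership
-- scans) by ONE multi-source flood fill of the liberty-having stones; same return value.

-- ===== PORT A =====
-- board[i][j]; every access site keeps 0 ≤ i,j < len(board), so under Pre_ the index is in
-- range and the default never fires (outside Pre_ Python raises IndexError)
def pvCellA (board : List (List Int)) (i j : Int) : Int :=
  PySem.List.pyGetD (PySem.List.pyGetD board i []) j 0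

def detect_neighbor (i j : Int) (board : List (List Int)) : List (Int × Int) :=
  let n : Int := board.length
  ((if i > 0 then [(i - 1, j)] else []) ++ (if i < n - 1 then [(i + 1, j)] else [])
    ++ (if j > 0 then [(i, j - 1)] else []) ++ (if j < n - 1 then [(i, j + 1)] else []))

def detect_neighbor_ally (i j : Int) (board : List (List Int)) : List (Int × Int) :=
  (detect_neighbor i j board).filter (fun p => pvCellA board p.1 p.2 == pvCellA board i j)

-- 'for ally in neighbor_allies: if ally not in stack and ally not in ally_members: stack.append(ally)'
-- (stack kept top-first: Python appends/pops at the right end, here cons/head; downstream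
--  only stack membership and the set of members matter)
def pvPush (stack members allies : List (Int × Int)) : List (Int × Int) :=
  allies.foldl (fun st a => if a ∈ st ∨ a ∈ members then st else a :: st) stack

-- the 'while stack:' loop of ally_dfs; fuel n*n+1 is proven sufficient below
def ally_dfs_loop (board : List (List Int)) :
    Nat → List (Int × Int) → List (Int × Int) → List (Int × Int)
  | 0, _, members => members
  | _ + 1, [], members => members
  | fuel + 1, p :: rest, members =>
      let members' := members ++ [p]
      ally_dfs_loop board fuel
        (pvPush rest members' (detect_neighbor_ally p.1 p.2 board)) members'

def ally_dfs (i j : Int) (board : List (List Int)) : List (Int × Int) :=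
  ally_dfs_loop board (board.length * board.length + 1) [(i, j)] []

def find_liberty (i j : Int) (board : List (List Int)) : Bool :=
  (ally_dfs i j board).any fun m =>
    (detect_neighbor m.1 m.2 board).any fun q => pvCellA board q.1 q.2 == 0

def find_died_pieces (Matrix_for_opponent : List (List Int)) (piece_type : Int) :
    List (Int × Int) :=
  let board := Matrix_for_opponent
  let n : Int := board.length
  (PySem.List.pyRange 0 n 1).foldl (fun acc i =>
    (PySem.List.pyRange 0 n 1).foldl (fun acc j =>
      if pvCellA board i j == piece_type && !(find_liberty i j board) then acc ++ [(i, j)]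
      else acc) acc) []

-- ===== PORT B =====
def pvCellB (board : List (List Int)) (i j : Int) : Int :=
  PySem.List.pyGetD (PySem.List.pyGetD board i []) j 0

-- '((i-1,j),(i+1,j),(i,j-1),(i,j+1)) ... if 0 <= a < n and 0 <= b < n'
def pvNbrs (n i j : Int) : List (Int × Int) :=
  [(i - 1, j), (i + 1, j), (i, j - 1), (i, j + 1)].filter
    (fun p => decide (0 ≤ p.1) && decide (p.1 < n) && decide (0 ≤ p.2) && decide (p.2 < n))

-- the seeding double 'for' loop: (alive, frontier) after seeding
def pvSeed (board : List (List Int)) (piece_type : Int) (n : Int) :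
    PySem.Set (Int × Int) × List (Int × Int) :=
  (PySem.List.pyRange 0 n 1).foldl (fun st i =>
    (PySem.List.pyRange 0 n 1).foldl (fun st j =>
      if pvCellB board i j == piece_type
          && (pvNbrs n i j).any (fun q => pvCellB board q.1 q.2 == 0) then
        (PySem.Set.add st.1 (i, j), st.2 ++ [(i, j)])
      else st) st) (PySem.Set.empty, [])

-- the 'while frontier:' loop (frontier kept top-first: append/pop() at the right end is
-- cons/head here; only the alive set is consumed); fuel 2*n*n+1 is proven sufficient below
def pvFlood (board : List (List Int)) (piece_type : Int) (n : Int) :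
    Nat → List (Int × Int) → PySem.Set (Int × Int) → PySem.Set (Int × Int)
  | 0, _, alive => alive
  | _ + 1, [], alive => alive
  | fuel + 1, p :: rest, alive =>
      let st := (pvNbrs n p.1 p.2).foldl
        (fun (st : PySem.Set (Int × Int) × List (Int × Int)) q =>
          if pvCellB board q.1 q.2 == piece_type && !(PySem.Set.contains st.1 q) then
            (PySem.Set.add st.1 q, q :: st.2)
          else st) (alive, rest)
      pvFlood board piece_type n fuel st.2 st.1

def find_died_pieces_alt (Matrix_for_opponent : List (List Int)) (piece_type : Int) :
    List (Int × Int) :=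
  let board := Matrix_for_opponent
  let n : Int := board.length
  let seed := pvSeed board piece_type n
  let alive := pvFlood board piece_type n (2 * board.length * board.length + 1) seed.2 seed.1
  (PySem.List.pyRange 0 n 1).foldl (fun acc i =>
    (PySem.List.pyRange 0 n 1).foldl (fun acc j =>
      if pvCellB board i j == piece_type && !(PySem.Set.contains alive (i, j)) then
        acc ++ [(i, j)]
      else acc) acc) []

-- ===== PRECONDITION & SPEC =====
-- Pre_ excludes exactly the boards on which Python A raises IndexError: a row shorter than
-- len(board) is read at board[i][j] for some j < len(board) (B raises there as well).
def Pre_find_died_pieces (Matrix_for_opponent : List (List Int)) (piece_type : Int) : Prop :=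
  ∀ row ∈ Matrix_for_opponent, Matrix_for_opponent.length ≤ row.length
instance (Matrix_for_opponent : List (List Int)) (piece_type : Int) : Decidable (Pre_find_died_pieces Matrix_for_opponent piece_type) := by unfold Pre_find_died_pieces; infer_instance
def pvWitness_find_died_pieces : List (List Int) × Int := ([[1, 0], [2, 1]], 1)

def Spec_find_died_pieces (Matrix_for_opponent : List (List Int)) (piece_type : Int) (out : List (Int × Int)) : Prop := out = find_died_pieces_alt Matrix_for_opponent piece_type
instance (Matrix_for_opponent : List (List Int)) (piece_type : Int) (out : List (Int × Int)) : Decidable (Spec_find_died_pieces Matrix_for_opponent piece_type out) := by unfold Spec_find_died_pieces; infer_instance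

-- ===== CLAIM (what is proved, stated in full; the proofs are below) =====
def Claim_equal_find_died_pieces : Prop := ∀ (Matrix_for_opponent : List (List Int)) (piece_type : Int), Dom_find_died_pieces Matrix_for_opponent piece_type → Pre_find_died_pieces Matrix_for_opponent piece_type → Spec_find_died_pieces Matrix_for_opponent piece_type (find_died_pieces Matrix_for_opponent piece_type)

-- ===== LEMMAS AND PROOFS =====

-- proof-side vocabulary ---------------------------------------------------------------

def pvInGrid (n : Nat) (p : Int × Int) : Prop :=
  0 ≤ p.1 ∧ p.1 < (n : Int) ∧ 0 ≤ p.2 ∧ p.2 < (n : Int)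

-- neighbors of p of color pt (the edge relation both searches walk)
def pvCNbr (board : List (List Int)) (pt : Int) (p : Int × Int) : List (Int × Int) :=
  (pvNbrs (board.length : Int) p.1 p.2).filter (fun q => pvCellA board q.1 q.2 == pt)

inductive pvReach (board : List (List Int)) (pt : Int) : (Int × Int) → (Int × Int) → Prop
  | refl (p) : pvReach board pt p p
  | tail {p q r} : pvReach board pt p q → r ∈ pvCNbr board pt q → pvReach board pt p r

def pvGood (board : List (List Int)) (pt : Int) (p : Int × Int) : Prop :=
  pvInGrid board.length p ∧ pvCellA board p.1 p.2 = pt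

def pvHasLib (board : List (List Int)) (p : Int × Int) : Prop :=
  ∃ q ∈ pvNbrs (board.length : Int) p.1 p.2, pvCellA board q.1 q.2 = 0

def pvGridL (n : Nat) : List (Int × Int) :=
  (PySem.List.pyRange 0 n 1).flatMap fun i => (PySem.List.pyRange 0 n 1).map fun j => (i, j)

-- basic facts --------------------------------------------------------------------------



lemma pvCellB_eq : pvCellB = pvCellA := rfl

lemma mem_pvNbrs {n i j : Int} {q : Int × Int} :
    q ∈ pvNbrs n i j ↔
      (q = (i - 1, j) ∨ q = (i + 1, j) ∨ q = (i, j - 1) ∨ q = (i, j + 1)) ∧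
        0 ≤ q.1 ∧ q.1 < n ∧ 0 ≤ q.2 ∧ q.2 < n := by
  simp only [pvNbrs, List.mem_filter, List.mem_cons, List.not_mem_nil, or_false,
    Bool.and_eq_true, decide_eq_true_eq]
  tauto

lemma pvNbrs_symm {n : Nat} {p q : Int × Int} (hp : pvInGrid n p) (hq : pvInGrid n q) :
    q ∈ pvNbrs (n : Int) p.1 p.2 ↔ p ∈ pvNbrs (n : Int) q.1 q.2 := by
  obtain ⟨hp1, hp2, hp3, hp4⟩ := hp
  obtain ⟨hq1, hq2, hq3, hq4⟩ := hq
  simp only [mem_pvNbrs, Prod.ext_iff]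
  omega

set_option maxHeartbeats 1000000 in
lemma mem_detect {board : List (List Int)} {i j : Int} {q : Int × Int}
    (h : pvInGrid board.length (i, j)) :
    q ∈ detect_neighbor i j board ↔ q ∈ pvNbrs (board.length : Int) i j := by
  obtain ⟨h1, h2, h3, h4⟩ := h
  simp only [detect_neighbor, List.mem_append, mem_pvNbrs]
  split_ifs <;> simp_all [Prod.ext_iff] <;> omega

lemma mem_pvCNbr {board : List (List Int)} {pt : Int} {p q : Int × Int} :
    q ∈ pvCNbr board pt p ↔
      q ∈ pvNbrs (board.length : Int) p.1 p.2 ∧ pvCellA board q.1 q.2 = pt := by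
  simp [pvCNbr, List.mem_filter]

lemma good_of_mem_pvCNbr {board : List (List Int)} {pt : Int} {p q : Int × Int}
    (h : q ∈ pvCNbr board pt p) : pvGood board pt q := by
  rw [mem_pvCNbr] at h
  obtain ⟨hn, hc⟩ := h
  rw [mem_pvNbrs] at hn
  exact ⟨⟨hn.2.1, hn.2.2.1, hn.2.2.2.1, hn.2.2.2.2⟩, hc⟩

lemma mem_ally {board : List (List Int)} {pt : Int} {p q : Int × Int}
    (h : pvGood board pt p) :
    q ∈ detect_neighbor_ally p.1 p.2 board ↔ q ∈ pvCNbr board pt p := by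
  unfold detect_neighbor_ally
  rw [mem_pvCNbr]
  simp only [List.mem_filter, beq_iff_eq]
  rw [h.2, mem_detect h.1]

lemma mem_pvGridL {n : Nat} {p : Int × Int} : p ∈ pvGridL n ↔ pvInGrid n p := by
  simp only [pvGridL, List.mem_flatMap, List.mem_map, PySem.List.mem_pyRange_one, pvInGrid]
  constructor
  · rintro ⟨i, ⟨hi0, hin⟩, j, ⟨hj0, hjn⟩, rfl⟩
    exact ⟨hi0, hin, hj0, hjn⟩
  · rintro ⟨h1, h2, h3, h4⟩
    exact ⟨p.1, ⟨h1, h2⟩, p.2, ⟨h3, h4⟩, rfl⟩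

lemma nodup_pvGridL {n : Nat} : (pvGridL n).Nodup := by
  show ((PySem.List.pyRange 0 n 1).product (PySem.List.pyRange 0 n 1)).Nodup
  exact List.Nodup.product (PySem.List.nodup_pyRange_one _ _) (PySem.List.nodup_pyRange_one _ _)

lemma length_pvGridL {n : Nat} : (pvGridL n).length = n * n := by
  show ((PySem.List.pyRange 0 n 1) ×ˢ (PySem.List.pyRange 0 n 1)).length = n * n
  rw [List.length_product]
  simp [PySem.List.length_pyRange_one]

lemma length_le_of_grid {n : Nat} {l : List (Int × Int)} (hnd : l.Nodup)
    (hg : ∀ p ∈ l, pvInGrid n p) : l.length ≤ n * n := by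
  have hsub : l ⊆ pvGridL n := fun p hp => mem_pvGridL.mpr (hg p hp)
  simpa [length_pvGridL] using (List.subperm_of_subset hnd hsub).length_le

lemma mem_pvPush {st mem allies : List (Int × Int)} {x : Int × Int} :
    x ∈ pvPush st mem allies ↔ x ∈ st ∨ (x ∈ allies ∧ x ∉ mem) := by
  induction allies generalizing st with
  | nil => simp [pvPush]
  | cons a as ih =>
      show x ∈ pvPush (if a ∈ st ∨ a ∈ mem then st else a :: st) mem as ↔ _
      rw [ih]
      by_cases h : a ∈ st ∨ a ∈ mem
      · simp only [if_pos h, List.mem_cons]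
        constructor
        · rintro (hx | ⟨hx, hnm⟩)
          · exact Or.inl hx
          · exact Or.inr ⟨Or.inr hx, hnm⟩
        · rintro (hx | ⟨hx | hx, hnm⟩)
          · exact Or.inl hx
          · subst hx
            rcases h with h | h
            · exact Or.inl h
            · exact absurd h hnm
          · exact Or.inr ⟨hx, hnm⟩
      · simp only [if_neg h, List.mem_cons]
        constructor
        · rintro ((hx | hx) | ⟨hx, hnm⟩)
          · subst hx
            exact Or.inr ⟨Or.inl rfl, fun hm => h (Or.inr hm)⟩
          · exact Or.inl hx
          · exact Or.inr ⟨Or.inr hx, hnm⟩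
        · rintro (hx | ⟨hx | hx, hnm⟩)
          · exact Or.inl (Or.inr hx)
          · exact Or.inl (Or.inl hx)
          · exact Or.inr ⟨hx, hnm⟩

lemma nodup_pvPush {st mem : List (Int × Int)} (allies : List (Int × Int))
    (h : st.Nodup) : (pvPush st mem allies).Nodup := by
  induction allies generalizing st with
  | nil => exact h
  | cons a as ih =>
      show (pvPush (if a ∈ st ∨ a ∈ mem then st else a :: st) mem as).Nodup
      split_ifs with hc
      · exact ih h
      · exact ih (List.nodup_cons.mpr ⟨fun hm => hc (Or.inl hm), h⟩)
lemma pvReach_good {board : List (List Int)} {pt : Int} {p q : Int × Int}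
    (hp : pvGood board pt p) (h : pvReach board pt p q) : pvGood board pt q := by
  induction h with
  | refl => exact hp
  | tail _ hmem _ => exact good_of_mem_pvCNbr hmem

lemma pvReach_trans {board : List (List Int)} {pt : Int} {p q r : Int × Int}
    (h1 : pvReach board pt p q) (h2 : pvReach board pt q r) : pvReach board pt p r := by
  induction h2 with
  | refl => exact h1
  | tail _ hmem ih => exact pvReach.tail ih hmem

lemma pvCNbr_symm {board : List (List Int)} {pt : Int} {p q : Int × Int}
    (hp : pvGood board pt p) (hq : pvGood board pt q) :
    q ∈ pvCNbr board pt p ↔ p ∈ pvCNbr board pt q := by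
  rw [mem_pvCNbr, mem_pvCNbr, pvNbrs_symm hp.1 hq.1]
  exact and_congr_right fun _ => by rw [hp.2, hq.2]

lemma pvReach_symm {board : List (List Int)} {pt : Int} {p q : Int × Int}
    (hp : pvGood board pt p) (h : pvReach board pt p q) : pvReach board pt q p := by
  induction h with
  | refl => exact pvReach.refl p
  | @tail x r hx hmem ih =>
      exact pvReach_trans
        (pvReach.tail (pvReach.refl r)
          ((pvCNbr_symm (good_of_mem_pvCNbr hmem) (pvReach_good hp hx)).mpr hmem)) ih

lemma dfs_loop_spec (board : List (List Int)) (pt : Int) (s : Int × Int) :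
    ∀ (fuel : Nat) (stack members : List (Int × Int)),
      fuel + members.length = board.length * board.length + 1 →
      stack.Nodup → members.Nodup →
      (∀ p ∈ stack, p ∉ members) →
      (∀ p, p ∈ stack ∨ p ∈ members → pvGood board pt p ∧ pvReach board pt s p) →
      (∀ p ∈ members, ∀ q ∈ pvCNbr board pt p, q ∈ members ∨ q ∈ stack) →
      (∀ m ∈ ally_dfs_loop board fuel stack members, pvReach board pt s m) ∧
      (∀ p, p ∈ stack ∨ p ∈ members → p ∈ ally_dfs_loop board fuel stack members) ∧
      (∀ p ∈ ally_dfs_loop board fuel stack members, ∀ q ∈ pvCNbr board pt p,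
        q ∈ ally_dfs_loop board fuel stack members) := by
  intro fuel
  induction fuel with
  | zero =>
      intro stack members hfuel _ hndm _ hgood _
      exfalso
      have hle : members.length ≤ board.length * board.length :=
        length_le_of_grid hndm (fun p hp => ((hgood p (Or.inr hp)).1).1)
      omega
  | succ f ih =>
      intro stack members hfuel hnds hndm hdisj hgood hclosed
      cases stack with
      | nil =>
          have hres : ally_dfs_loop board (f + 1) [] members = members := rfl
          rw [hres]
          refine ⟨fun m hm => (hgood m (Or.inr hm)).2, ?_, ?_⟩
          · rintro p (hp | hp)
            · exact absurd hp (List.not_mem_nil)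
            · exact hp
          · intro p hp q hq
            rcases hclosed p hp q hq with h | h
            · exact h
            · exact absurd h (List.not_mem_nil)
      | cons p rest =>
          have hpgood : pvGood board pt p ∧ pvReach board pt s p :=
            hgood p (Or.inl List.mem_cons_self)
          have hpnm : p ∉ members := hdisj p List.mem_cons_self
          have hndr : rest.Nodup := hnds.of_cons
          have hpnr : p ∉ rest := (List.nodup_cons.mp hnds).1
          have hstep : ally_dfs_loop board (f + 1) (p :: rest) members
              = ally_dfs_loop board f
                  (pvPush rest (members ++ [p]) (detect_neighbor_ally p.1 p.2 board))
                  (members ++ [p]) := rfl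
          rw [hstep]
          have hmem' : ∀ x, x ∈ pvPush rest (members ++ [p]) (detect_neighbor_ally p.1 p.2 board)
              ↔ x ∈ rest ∨ (x ∈ pvCNbr board pt p ∧ x ∉ members ++ [p]) := by
            intro x
            rw [mem_pvPush]
            rw [mem_ally hpgood.1]
          obtain ⟨ha, hb, hc⟩ := ih
            (pvPush rest (members ++ [p]) (detect_neighbor_ally p.1 p.2 board))
            (members ++ [p])
            (by simp only [List.length_append, List.length_cons, List.length_nil] at *; omega)
            (nodup_pvPush _ hndr)
            (by
              rw [List.nodup_append]
              refine ⟨hndm, List.nodup_singleton p, ?_⟩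
              intro x hx y hy
              rw [List.mem_singleton] at hy
              subst hy
              intro he
              exact hpnm (he ▸ hx))
            (by
              intro x hx
              rcases (hmem' x).mp hx with hxr | ⟨_, hnm⟩
              · have hxp : x ≠ p := fun h => hpnr (h ▸ hxr)
                have hxnm : x ∉ members := hdisj x (List.mem_cons_of_mem _ hxr)
                simp [hxnm, hxp]
              · exact hnm)
            (by
              intro x hx
              rcases hx with hx | hx
              · rcases (hmem' x).mp hx with hxr | ⟨hcn, _⟩
                · exact hgood x (Or.inl (List.mem_cons_of_mem _ hxr))
                · exact ⟨good_of_mem_pvCNbr hcn, pvReach.tail hpgood.2 hcn⟩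
              · rcases List.mem_append.mp hx with hxm | hxp
                · exact hgood x (Or.inr hxm)
                · have hxeq : x = p := by simpa using hxp
                  exact hxeq ▸ hpgood)
            (by
              intro m hm q hq
              rcases List.mem_append.mp hm with hmm | hmp
              · rcases hclosed m hmm q hq with hql | hqr
                · exact Or.inl (List.mem_append.mpr (Or.inl hql))
                · rcases List.mem_cons.mp hqr with rfl | hqrest
                  · exact Or.inl (List.mem_append.mpr (Or.inr (List.mem_singleton_self _)))
                  · exact Or.inr ((hmem' q).mpr (Or.inl hqrest))
              · have hmeq : m = p := by simpa using hmp
                subst hmeq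
                by_cases hqm : q ∈ members ++ [m]
                · exact Or.inl hqm
                · exact Or.inr ((hmem' q).mpr (Or.inr ⟨hq, hqm⟩)))
          refine ⟨ha, ?_, hc⟩
          intro x hx
          apply hb
          rcases hx with hx | hx
          · rcases List.mem_cons.mp hx with rfl | hxr
            · exact Or.inr (List.mem_append.mpr (Or.inr (List.mem_singleton_self _)))
            · exact Or.inl ((hmem' x).mpr (Or.inl hxr))
          · exact Or.inr (List.mem_append.mpr (Or.inl hx))

lemma ally_dfs_spec {board : List (List Int)} {pt : Int} {s : Int × Int}
    (hs : pvGood board pt s) :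
    ∀ m, m ∈ ally_dfs s.1 s.2 board ↔ pvReach board pt s m := by
  obtain ⟨ha, hb, hc⟩ := dfs_loop_spec board pt s (board.length * board.length + 1) [s] []
    (by simp)
    (List.nodup_singleton s)
    List.nodup_nil
    (by simp)
    (by
      rintro p (hp | hp)
      · rw [List.mem_singleton.mp hp]
        exact ⟨hs, pvReach.refl s⟩
      · exact absurd hp (List.not_mem_nil))
    (by simp)
  intro m
  constructor
  · exact fun h => ha m h
  · intro h
    induction h with
    | refl => exact hb s (Or.inl (List.mem_singleton_self s))
    | tail _ hmem ih => exact hc _ ih _ hmem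

lemma find_liberty_iff {board : List (List Int)} {pt : Int} {s : Int × Int}
    (hs : pvGood board pt s) :
    find_liberty s.1 s.2 board = true ↔
      ∃ m, pvReach board pt s m ∧ pvHasLib board m := by
  unfold find_liberty pvHasLib
  simp only [List.any_eq_true, beq_iff_eq]
  constructor
  · rintro ⟨m, hm, q, hq, hq0⟩
    have hreach := (ally_dfs_spec hs m).mp hm
    have hmg := pvReach_good hs hreach
    rw [mem_detect hmg.1] at hq
    exact ⟨m, hreach, q, hq, hq0⟩
  · rintro ⟨m, hreach, q, hq, hq0⟩
    have hmg := pvReach_good hs hreach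
    refine ⟨m, (ally_dfs_spec hs m).mpr hreach, q, ?_, hq0⟩
    rw [mem_detect hmg.1]
    exact hq



-- B's seed -----------------------------------------------------------------------------

def pvSrcB (board : List (List Int)) (pt : Int) (p : Int × Int) : Bool :=
  pvCellA board p.1 p.2 == pt
    && (pvNbrs (board.length : Int) p.1 p.2).any (fun q => pvCellA board q.1 q.2 == 0)

lemma foldl_pair {α β ι : Type} (f : α → ι → α) (g : β → ι → β) :
    ∀ (l : List ι) (a : α) (b : β),
      l.foldl (fun st x => (f st.1 x, g st.2 x)) (a, b) = (l.foldl f a, l.foldl g b) := by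
  intro l
  induction l with
  | nil => intro a b; rfl
  | cons x xs ih => intro a b; exact ih (f a x) (g b x)

lemma ite_pair {α β : Type} (c : Bool) (st : α × β) (a : α) (b : β) :
    (if c then (a, b) else st) = ((if c then a else st.1), (if c then b else st.2)) := by
  cases c <;> simp

lemma seed_flatten {α : Type} (c : Int × Int → Bool) (upd : α → (Int × Int) → α) :
    ∀ (rows cols : List Int) (init : α),
      rows.foldl (fun a i => cols.foldl (fun s j => if c (i, j) then upd s (i, j) else s) a) init
        = (rows.flatMap fun i => cols.map fun j => (i, j)).foldl
            (fun s q => if c q then upd s q else s) init := by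
  intro rows
  induction rows with
  | nil => intro cols init; rfl
  | cons r rs ih =>
      intro cols init
      simp only [List.flatMap_cons, List.foldl_append, List.foldl_cons, List.foldl_map]
      exact ih cols _

lemma condfold_append (c : Int × Int → Bool) :
    ∀ (l init : List (Int × Int)),
      l.foldl (fun s q => if c q then s ++ [q] else s) init = init ++ l.filter c := by
  intro l
  induction l with
  | nil => intro init; simp
  | cons q l ih =>
      intro init
      simp only [List.foldl_cons, List.filter_cons]
      by_cases hc : c q = true
      · rw [if_pos hc, if_pos hc, ih]
        exact (List.append_cons _ _ _).symm
      · rw [if_neg hc, if_neg hc, ih]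

lemma condfold_add (c : Int × Int → Bool) :
    ∀ (l s : List (Int × Int)), (∀ x ∈ l, x ∉ s) → l.Nodup →
      l.foldl (fun s q => if c q then PySem.Set.add s q else s) s = s ++ l.filter c := by
  intro l
  induction l with
  | nil => intro s _ _; simp
  | cons q l ih =>
      intro s hfresh hnd
      simp only [List.foldl_cons, List.filter_cons]
      by_cases hc : c q = true
      · rw [if_pos hc, if_pos hc]
        have hq : q ∉ s := hfresh q List.mem_cons_self
        have hadd : PySem.Set.add s q = s ++ [q] := by
          simp [PySem.Set.add, PySem.Set.contains, List.contains_eq_mem, hq]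
        rw [hadd, ih (s ++ [q]) (by
            intro x hx
            simp only [List.mem_append, List.mem_singleton]
            rintro (hxs | rfl)
            · exact hfresh x (List.mem_cons_of_mem _ hx) hxs
            · exact (List.nodup_cons.mp hnd).1 hx) hnd.of_cons]
        exact (List.append_cons _ _ _).symm
      · rw [if_neg hc, if_neg hc]
        exact ih s (fun x hx => hfresh x (List.mem_cons_of_mem _ hx)) hnd.of_cons

lemma seed_eq (board : List (List Int)) (pt : Int) :
    pvSeed board pt (board.length : Int)
      = ((pvGridL board.length).filter (pvSrcB board pt),
         (pvGridL board.length).filter (pvSrcB board pt)) := by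
  unfold pvSeed
  have hstep : (fun (st : PySem.Set (Int × Int) × List (Int × Int)) (i : Int) =>
      (PySem.List.pyRange 0 (board.length : Int) 1).foldl
        (fun st j =>
          if pvCellB board i j == pt
              && (pvNbrs (board.length : Int) i j).any (fun q => pvCellB board q.1 q.2 == 0) then
            (PySem.Set.add st.1 (i, j), st.2 ++ [(i, j)])
          else st) st)
      = fun st i =>
        ((PySem.List.pyRange 0 (board.length : Int) 1).foldl
          (fun s j => if pvSrcB board pt (i, j) then PySem.Set.add s (i, j) else s) st.1,
         (PySem.List.pyRange 0 (board.length : Int) 1).foldl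
          (fun l j => if pvSrcB board pt (i, j) then l ++ [(i, j)] else l) st.2) := by
    funext st i
    rw [show (fun (st : PySem.Set (Int × Int) × List (Int × Int)) (j : Int) =>
        if pvCellB board i j == pt
            && (pvNbrs (board.length : Int) i j).any (fun q => pvCellB board q.1 q.2 == 0) then
          (PySem.Set.add st.1 (i, j), st.2 ++ [(i, j)])
        else st)
      = fun st j => ((if pvSrcB board pt (i, j) then PySem.Set.add st.1 (i, j) else st.1),
                     (if pvSrcB board pt (i, j) then st.2 ++ [(i, j)] else st.2)) from
      funext fun st => funext fun j => ite_pair _ st _ _]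
    exact foldl_pair
      (fun (s : PySem.Set (Int × Int)) (j : Int) =>
        if pvSrcB board pt (i, j) then PySem.Set.add s (i, j) else s)
      (fun (l : List (Int × Int)) (j : Int) =>
        if pvSrcB board pt (i, j) then l ++ [(i, j)] else l)
      (PySem.List.pyRange 0 (board.length : Int) 1) st.1 st.2
  rw [hstep]
  have houter := foldl_pair
    (fun (s : PySem.Set (Int × Int)) (i : Int) =>
      (PySem.List.pyRange 0 (board.length : Int) 1).foldl
        (fun s j => if pvSrcB board pt (i, j) then PySem.Set.add s (i, j) else s) s)
    (fun (l : List (Int × Int)) (i : Int) =>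
      (PySem.List.pyRange 0 (board.length : Int) 1).foldl
        (fun l j => if pvSrcB board pt (i, j) then l ++ [(i, j)] else l) l)
    (PySem.List.pyRange 0 (board.length : Int) 1) PySem.Set.empty []
  have hcomp : ((PySem.List.pyRange 0 (board.length : Int) 1).foldl
        (fun (s : PySem.Set (Int × Int)) (i : Int) =>
          (PySem.List.pyRange 0 (board.length : Int) 1).foldl
            (fun s j => if pvSrcB board pt (i, j) then PySem.Set.add s (i, j) else s) s)
        PySem.Set.empty,
      (PySem.List.pyRange 0 (board.length : Int) 1).foldl
        (fun (l : List (Int × Int)) (i : Int) =>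
          (PySem.List.pyRange 0 (board.length : Int) 1).foldl
            (fun l j => if pvSrcB board pt (i, j) then l ++ [(i, j)] else l) l)
        [])
      = ((pvGridL board.length).filter (pvSrcB board pt),
         (pvGridL board.length).filter (pvSrcB board pt)) := by
    rw [Prod.mk.injEq]
    constructor
    · exact Eq.trans
        (seed_flatten (pvSrcB board pt) PySem.Set.add
          (PySem.List.pyRange 0 (board.length : Int) 1)
          (PySem.List.pyRange 0 (board.length : Int) 1) PySem.Set.empty)
        ((condfold_add (pvSrcB board pt) (pvGridL board.length) PySem.Set.empty
          (by intro x _ h; exact absurd h List.not_mem_nil) nodup_pvGridL).trans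
          (List.nil_append _))
    · exact Eq.trans
        (seed_flatten (pvSrcB board pt) (fun l q => l ++ [q])
          (PySem.List.pyRange 0 (board.length : Int) 1)
          (PySem.List.pyRange 0 (board.length : Int) 1) [])
        ((condfold_append (pvSrcB board pt) (pvGridL board.length) []).trans
          (List.nil_append _))
  exact Eq.trans houter hcomp

-- B's flood loop -----------------------------------------------------------------------

def pvFloodStep (board : List (List Int)) (pt : Int) :
    PySem.Set (Int × Int) × List (Int × Int) → (Int × Int) →
      PySem.Set (Int × Int) × List (Int × Int) :=
  fun st q =>
    if pvCellB board q.1 q.2 == pt && !(PySem.Set.contains st.1 q) then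
      (PySem.Set.add st.1 q, q :: st.2)
    else st

lemma flood_fold (board : List (List Int)) (pt : Int) :
    ∀ (qs alive rest : List (Int × Int)), alive.Nodup →
      (qs.foldl (pvFloodStep board pt) (alive, rest)).1.Nodup ∧
      (∀ x, x ∈ (qs.foldl (pvFloodStep board pt) (alive, rest)).1 ↔
        x ∈ alive ∨ (x ∈ qs ∧ pvCellA board x.1 x.2 = pt)) ∧
      (∀ x ∈ (qs.foldl (pvFloodStep board pt) (alive, rest)).2,
        x ∈ rest ∨ x ∈ (qs.foldl (pvFloodStep board pt) (alive, rest)).1) ∧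
      (∀ x ∈ rest, x ∈ (qs.foldl (pvFloodStep board pt) (alive, rest)).2) ∧
      (∀ x ∈ (qs.foldl (pvFloodStep board pt) (alive, rest)).1,
        x ∈ alive ∨ x ∈ (qs.foldl (pvFloodStep board pt) (alive, rest)).2) ∧
      (qs.foldl (pvFloodStep board pt) (alive, rest)).1.length + rest.length
        = alive.length + (qs.foldl (pvFloodStep board pt) (alive, rest)).2.length := by
  intro qs
  induction qs with
  | nil =>
      intro alive rest hnd
      simp only [List.foldl_nil]
      refine ⟨hnd, ?_, ?_, ?_, ?_, ?_⟩
      · intro x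
        simp
      · intro x hx
        exact Or.inl hx
      · intro x hx
        exact hx
      · intro x hx
        exact Or.inl hx
      · trivial
  | cons q qs ih =>
      intro alive rest hnd
      by_cases hq : (pvCellB board q.1 q.2 == pt && !(PySem.Set.contains alive q)) = true
      · rw [Bool.and_eq_true, beq_iff_eq, Bool.not_eq_true'] at hq
        obtain ⟨hcell, hcont⟩ := hq
        have hnotmem : q ∉ alive := by
          simpa [PySem.Set.contains, List.contains_eq_mem] using hcont
        have hstep : pvFloodStep board pt (alive, rest) q = (alive ++ [q], q :: rest) := by
          simp [pvFloodStep, hcell, PySem.Set.add, PySem.Set.contains,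
            List.contains_eq_mem, hnotmem]
        have hstep' : (q :: qs).foldl (pvFloodStep board pt) (alive, rest)
            = qs.foldl (pvFloodStep board pt) (alive ++ [q], q :: rest) := by
          rw [List.foldl_cons, hstep]
        have hnd' : (alive ++ [q]).Nodup := by
          rw [List.nodup_append]
          refine ⟨hnd, List.nodup_singleton q, ?_⟩
          intro x hx y hy
          rw [List.mem_singleton] at hy
          subst hy
          intro he
          exact hnotmem (he ▸ hx)
        obtain ⟨i1, i2, i3, i4, i5, i6⟩ := ih (alive ++ [q]) (q :: rest) hnd'
        rw [hstep']
        refine ⟨i1, ?_, ?_, ?_, ?_, ?_⟩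
        · intro x
          rw [i2 x]
          constructor
          · rintro (hx | ⟨hx, hc⟩)
            · rcases List.mem_append.mp hx with hx | hx
              · exact Or.inl hx
              · rw [List.mem_singleton.mp hx]
                exact Or.inr ⟨List.mem_cons_self, hcell⟩
            · exact Or.inr ⟨List.mem_cons_of_mem _ hx, hc⟩
          · rintro (hx | ⟨hx, hc⟩)
            · exact Or.inl (List.mem_append.mpr (Or.inl hx))
            · rcases List.mem_cons.mp hx with rfl | hx
              · exact Or.inl (List.mem_append.mpr (Or.inr (List.mem_singleton_self _)))
              · exact Or.inr ⟨hx, hc⟩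
        · intro x hx
          rcases i3 x hx with hx' | hx'
          · rcases List.mem_cons.mp hx' with rfl | hx''
            · exact Or.inr ((i2 x).mpr (Or.inl (List.mem_append.mpr
                (Or.inr (List.mem_singleton_self _)))))
            · exact Or.inl hx''
          · exact Or.inr hx'
        · exact fun x hx => i4 x (List.mem_cons_of_mem _ hx)
        · intro x hx
          rcases i5 x hx with hx' | hx'
          · rcases List.mem_append.mp hx' with hx'' | hx''
            · exact Or.inl hx''
            · rw [List.mem_singleton.mp hx'']
              exact Or.inr (i4 q List.mem_cons_self)
          · exact Or.inr hx'
        · simp only [List.length_append, List.length_cons, List.length_nil] at i6 ⊢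
          omega
      · have hstep : pvFloodStep board pt (alive, rest) q = (alive, rest) := by
          simp only [pvFloodStep]
          rw [if_neg hq]
        have hor : pvCellA board q.1 q.2 ≠ pt ∨ q ∈ alive := by
          by_cases hc : pvCellA board q.1 q.2 = pt
          · right
            by_contra hm
            apply hq
            simp [pvCellB_eq, hc, PySem.Set.contains, List.contains_eq_mem, hm]
          · exact Or.inl hc
        have hstep' : (q :: qs).foldl (pvFloodStep board pt) (alive, rest)
            = qs.foldl (pvFloodStep board pt) (alive, rest) := by
          rw [List.foldl_cons, hstep]
        obtain ⟨i1, i2, i3, i4, i5, i6⟩ := ih alive rest hnd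
        rw [hstep']
        refine ⟨i1, ?_, i3, i4, i5, i6⟩
        intro x
        rw [i2 x]
        constructor
        · rintro (hx | ⟨hx, hc⟩)
          · exact Or.inl hx
          · exact Or.inr ⟨List.mem_cons_of_mem _ hx, hc⟩
        · rintro (hx | ⟨hx, hc⟩)
          · exact Or.inl hx
          · rcases List.mem_cons.mp hx with rfl | hx'
            · rcases hor with h | h
              · exact absurd hc h
              · exact Or.inl h
            · exact Or.inr ⟨hx', hc⟩

lemma flood_loop_spec (board : List (List Int)) (pt : Int) :
    ∀ (fuel : Nat) (frontier alive : List (Int × Int)),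
      2 * (board.length * board.length) + frontier.length ≤ fuel + 2 * alive.length →
      alive.Nodup →
      (∀ x ∈ alive, pvGood board pt x ∧
        ∃ src, (pvGood board pt src ∧ pvHasLib board src) ∧ pvReach board pt src x) →
      (∀ x ∈ frontier, x ∈ alive) →
      (∀ x ∈ alive, x ∈ frontier ∨ ∀ q ∈ pvCNbr board pt x, q ∈ alive) →
      (∀ x ∈ pvFlood board pt (board.length : Int) fuel frontier alive,
        pvGood board pt x ∧
          ∃ src, (pvGood board pt src ∧ pvHasLib board src) ∧ pvReach board pt src x) ∧
      (∀ x ∈ alive, x ∈ pvFlood board pt (board.length : Int) fuel frontier alive) ∧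
      (∀ x ∈ pvFlood board pt (board.length : Int) fuel frontier alive,
        ∀ q ∈ pvCNbr board pt x,
          q ∈ pvFlood board pt (board.length : Int) fuel frontier alive) := by
  intro fuel
  induction fuel with
  | zero =>
      intro frontier alive harith hnd hprops hsub hclosed
      have hlen : alive.length ≤ board.length * board.length :=
        length_le_of_grid hnd (fun p hp => (hprops p hp).1.1)
      have hfr : frontier = [] := by
        cases frontier with
        | nil => rfl
        | cons a l =>
            exfalso
            simp only [List.length_cons] at harith
            omega
      subst hfr
      have hres : pvFlood board pt (board.length : Int) 0 [] alive = alive := rfl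
      rw [hres]
      refine ⟨hprops, fun x hx => hx, ?_⟩
      intro x hx q hq
      rcases hclosed x hx with h | h
      · exact absurd h List.not_mem_nil
      · exact h q hq
  | succ f ih =>
      intro frontier alive harith hnd hprops hsub hclosed
      cases frontier with
      | nil =>
          have hres : pvFlood board pt (board.length : Int) (f + 1) [] alive = alive := rfl
          rw [hres]
          refine ⟨hprops, fun x hx => hx, ?_⟩
          intro x hx q hq
          rcases hclosed x hx with h | h
          · exact absurd h List.not_mem_nil
          · exact h q hq
      | cons p rest =>
          obtain ⟨hfnd, hfmem, hf2sub, hrestsub, hf1or, hflen⟩ :=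
            flood_fold board pt (pvNbrs (board.length : Int) p.1 p.2) alive rest hnd
          have hp_alive : p ∈ alive := hsub p List.mem_cons_self
          obtain ⟨hpgood, src, hsrc, hreach⟩ := hprops p hp_alive
          have hmemF : ∀ x,
              x ∈ ((pvNbrs (board.length : Int) p.1 p.2).foldl (pvFloodStep board pt)
                (alive, rest)).1
              ↔ x ∈ alive ∨ x ∈ pvCNbr board pt p := by
            intro x
            rw [hfmem x, mem_pvCNbr]
          have halive_le : alive.length ≤
              ((pvNbrs (board.length : Int) p.1 p.2).foldl (pvFloodStep board pt)
                (alive, rest)).1.length :=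
            (List.subperm_of_subset hnd (fun x hx => (hfmem x).mpr (Or.inl hx))).length_le
          have hres : pvFlood board pt (board.length : Int) (f + 1) (p :: rest) alive
              = pvFlood board pt (board.length : Int) f
                  ((pvNbrs (board.length : Int) p.1 p.2).foldl (pvFloodStep board pt)
                    (alive, rest)).2
                  ((pvNbrs (board.length : Int) p.1 p.2).foldl (pvFloodStep board pt)
                    (alive, rest)).1 := rfl
          obtain ⟨ha, hb, hc⟩ := ih
            ((pvNbrs (board.length : Int) p.1 p.2).foldl (pvFloodStep board pt)
              (alive, rest)).2
            ((pvNbrs (board.length : Int) p.1 p.2).foldl (pvFloodStep board pt)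
              (alive, rest)).1
            (by
              simp only [List.length_cons] at harith
              omega)
            hfnd
            (by
              intro x hx
              rcases (hmemF x).mp hx with hxa | hxc
              · exact hprops x hxa
              · exact ⟨good_of_mem_pvCNbr hxc, src, hsrc, pvReach.tail hreach hxc⟩)
            (by
              intro x hx
              rcases hf2sub x hx with hxr | hxF
              · exact (hmemF x).mpr (Or.inl (hsub x (List.mem_cons_of_mem _ hxr)))
              · exact hxF)
            (by
              intro x hx
              rcases hf1or x hx with hxa | hxF2
              · rcases hclosed x hxa with hxf | hxcl
                · rcases List.mem_cons.mp hxf with rfl | hxr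
                  · right
                    intro q hq
                    exact (hmemF q).mpr (Or.inr hq)
                  · exact Or.inl (hrestsub x hxr)
                · right
                  intro q hq
                  exact (hmemF q).mpr (Or.inl (hxcl q hq))
              · exact Or.inl hxF2)
          rw [hres]
          exact ⟨ha, fun x hx => hb x ((hmemF x).mpr (Or.inl hx)), hc⟩

lemma flood_spec (board : List (List Int)) (pt : Int) :
    ∀ x, x ∈ pvFlood board pt (board.length : Int) (2 * board.length * board.length + 1)
        (pvSeed board pt (board.length : Int)).2 (pvSeed board pt (board.length : Int)).1 ↔
      ∃ src, (pvGood board pt src ∧ pvHasLib board src) ∧ pvReach board pt src x := by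
  have hLprop : ∀ x ∈ (pvGridL board.length).filter (pvSrcB board pt),
      pvGood board pt x ∧ pvHasLib board x := by
    intro x hx
    rw [List.mem_filter] at hx
    obtain ⟨hg, hsrc⟩ := hx
    simp only [pvSrcB, Bool.and_eq_true, beq_iff_eq, List.any_eq_true] at hsrc
    obtain ⟨hcell, z, hz, hz0⟩ := hsrc
    exact ⟨⟨mem_pvGridL.mp hg, hcell⟩, z, hz, hz0⟩
  obtain ⟨ha, hb, hc⟩ := flood_loop_spec board pt (2 * board.length * board.length + 1)
    ((pvGridL board.length).filter (pvSrcB board pt))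
    ((pvGridL board.length).filter (pvSrcB board pt))
    (by
      have h2 : 2 * (board.length * board.length) = 2 * board.length * board.length :=
        (mul_assoc 2 board.length board.length).symm
      omega)
    (nodup_pvGridL.filter _)
    (fun x hx => ⟨(hLprop x hx).1, x, hLprop x hx, pvReach.refl x⟩)
    (fun x hx => hx)
    (fun x hx => Or.inl hx)
  have hseed := seed_eq board pt
  intro x
  rw [hseed]
  constructor
  · intro hx
    exact (ha x hx).2
  · rintro ⟨src, ⟨hgood, hlib⟩, hreach⟩
    induction hreach with
    | refl =>
        apply hb
        rw [List.mem_filter]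
        obtain ⟨z, hz, hz0⟩ := hlib
        refine ⟨mem_pvGridL.mpr hgood.1, ?_⟩
        simp only [pvSrcB, Bool.and_eq_true, beq_iff_eq, List.any_eq_true]
        exact ⟨hgood.2, z, hz, hz0⟩
    | tail _ hmem ih => exact hc _ ih _ hmem

lemma lib_iff_alive {board : List (List Int)} {pt : Int} {s : Int × Int}
    (hs : pvGood board pt s) :
    find_liberty s.1 s.2 board = true ↔
      s ∈ pvFlood board pt (board.length : Int) (2 * board.length * board.length + 1)
        (pvSeed board pt (board.length : Int)).2
        (pvSeed board pt (board.length : Int)).1 := by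
  rw [find_liberty_iff hs, flood_spec board pt s]
  constructor
  · rintro ⟨m, hr, hl⟩
    exact ⟨m, ⟨pvReach_good hs hr, hl⟩, pvReach_symm hs hr⟩
  · rintro ⟨src, ⟨hg, hl⟩, hr⟩
    exact ⟨src, pvReach_symm hg hr, hl⟩

lemma main_eq (board : List (List Int)) (pt : Int) :
    find_died_pieces board pt = find_died_pieces_alt board pt := by
  unfold find_died_pieces find_died_pieces_alt
  apply PySem.List.foldl_congr_mem
  intro acc i hi
  apply PySem.List.foldl_congr_mem
  intro acc2 j hj
  rw [PySem.List.mem_pyRange_one] at hi hj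
  have hcond : (pvCellA board i j == pt && !find_liberty i j board)
      = (pvCellB board i j == pt
          && !(PySem.Set.contains
                (pvFlood board pt (board.length : Int)
                  (2 * board.length * board.length + 1)
                  (pvSeed board pt (board.length : Int)).2
                  (pvSeed board pt (board.length : Int)).1) (i, j))) := by
    rw [pvCellB_eq]
    by_cases hc : pvCellA board i j = pt
    · have hg : pvGood board pt (i, j) := ⟨⟨hi.1, hi.2, hj.1, hj.2⟩, hc⟩
      have hbool : find_liberty i j board
          = PySem.Set.contains
              (pvFlood board pt (board.length : Int)
                (2 * board.length * board.length + 1)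
                (pvSeed board pt (board.length : Int)).2
                (pvSeed board pt (board.length : Int)).1) (i, j) := by
        rw [Bool.eq_iff_iff]
        rw [lib_iff_alive hg]
        simp [PySem.Set.contains, List.contains_eq_mem]
      rw [hbool]
    · have h1 : (pvCellA board i j == pt) = false := by simp [hc]
      rw [h1]
      simp
  rw [hcond]


-- ===== VERDICT (by name: the statement is the Claim_ definition above) =====
theorem find_died_pieces_spec : Claim_equal_find_died_pieces := by
  intro M pt _ _
  unfold Spec_find_died_pieces
  exact main_eq M pt
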